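-- pv_equiv track=rewrite | github.com/MarkNo1/Natural_Language_Processing | 01-Morphological_Segmentations/code/NLP.py | add_tag_to_morph
-- ===== SOURCE A (Python) =====
-- def add_tag_to_morph(morphemes):
--     label = []
--     label.append('START')
--     for morph in morphemes:
--         if len(morph) == 1:
--             label.append('S')
--         if len(morph) == 2:
--             label.append('B')
--             label.append('E')
--         if len(morph) > 2:
--             label.append('B')
--             for i in range(1, len(morph) - 1):
--                 label.append('M')
--             label.append('E')
--     label.append('STOP')
--     return label
-- ===== SOURCE B (Python) =====
-- def add_tag_to_morph(morphemes):
--     label = ['START']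
--     for morph in morphemes:
--         n = len(morph)
--         for i, _ in enumerate(morph):
--             if n == 1:
--                 label.append('S')
--             elif i == 0:
--                 label.append('B')
--             elif i == n - 1:
--                 label.append('E')
--             else:
--                 label.append('M')
--     label.append('STOP')
--     return label
-- ===== Notes on version B (the rewrite author's own statement) =====
-- stated objective: simpler
-- what changed: Replaces A's per-morpheme length-case branching (with a separate middle-only loop) by one uniform pass over every character, choosing each tag from its position.
import Mathlib
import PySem

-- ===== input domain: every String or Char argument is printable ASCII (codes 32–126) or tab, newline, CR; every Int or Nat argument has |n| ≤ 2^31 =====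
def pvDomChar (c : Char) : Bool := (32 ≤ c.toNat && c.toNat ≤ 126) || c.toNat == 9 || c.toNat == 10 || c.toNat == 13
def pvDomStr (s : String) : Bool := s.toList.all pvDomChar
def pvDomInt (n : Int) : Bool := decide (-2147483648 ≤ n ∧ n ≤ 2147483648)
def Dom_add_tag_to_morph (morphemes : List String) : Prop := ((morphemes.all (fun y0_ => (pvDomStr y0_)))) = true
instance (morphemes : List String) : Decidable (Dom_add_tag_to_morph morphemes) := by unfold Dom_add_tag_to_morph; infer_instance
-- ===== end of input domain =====

-- B replaces A's per-morpheme length-case branching (separate middle-only loop) by one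
-- uniform positional pass over every character; same cost, simpler decomposition.


-- ===== PORT A =====
-- literal port of A: three length-guarded appends per morpheme, inner range loop for 'M's
def add_tag_to_morph (morphemes : List String) : List String :=
  (morphemes.foldl (fun label morph =>
    let label := if PySem.Str.len morph = 1 then label ++ ["S"] else label
    let label := if PySem.Str.len morph = 2 then (label ++ ["B"]) ++ ["E"] else label
    let label := if PySem.Str.len morph > 2 then
        ((PySem.List.pyRange 1 (PySem.Str.len morph - 1) 1).foldl
          (fun l _ => l ++ ["M"]) (label ++ ["B"])) ++ ["E"]
      else label
    label) ["START"]) ++ ["STOP"]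

-- ===== PORT B =====
-- literal port of B: one tag per character, chosen from its position
def add_tag_to_morph_alt (morphemes : List String) : List String :=
  (morphemes.foldl (fun label morph =>
    let n : Int := PySem.Str.len morph
    (PySem.List.enumerate morph.toList 0).foldl
      (fun l ic =>
        l ++ [if n = 1 then "S" else if ic.1 = 0 then "B" else if ic.1 = n - 1 then "E" else "M"])
      label) ["START"]) ++ ["STOP"]

-- ===== PRECONDITION & SPEC =====
def Spec_add_tag_to_morph (morphemes : List String) (out : List String) : Prop := out = add_tag_to_morph_alt morphemes
instance (morphemes : List String) (out : List String) : Decidable (Spec_add_tag_to_morph morphemes out) := by unfold Spec_add_tag_to_morph; infer_instance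

-- ===== CLAIM (what is proved, stated in full; the proofs are below) =====
def Claim_equal_add_tag_to_morph : Prop := ∀ (morphemes : List String), Dom_add_tag_to_morph morphemes → Spec_add_tag_to_morph morphemes (add_tag_to_morph morphemes)

-- ===== LEMMAS AND PROOFS =====

-- the tag block both programs emit for one morpheme of length n
def pvTags (n : Nat) : List String :=
  if n = 0 then [] else if n = 1 then ["S"] else "B" :: (List.replicate (n - 2) "M" ++ ["E"])

theorem pvTags_large {n : Nat} (h : 1 < n) :
    pvTags n = "B" :: (List.replicate (n - 2) "M" ++ ["E"]) := by
  unfold pvTags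
  rw [if_neg (by omega), if_neg (by omega)]

theorem pvStepA (acc : List String) (m : String) :
    (let label := if PySem.Str.len m = 1 then acc ++ ["S"] else acc
     let label := if PySem.Str.len m = 2 then (label ++ ["B"]) ++ ["E"] else label
     let label := if PySem.Str.len m > 2 then
         ((PySem.List.pyRange 1 (PySem.Str.len m - 1) 1).foldl
           (fun l _ => l ++ ["M"]) (label ++ ["B"])) ++ ["E"]
       else label
     label) = acc ++ pvTags m.toList.length := by
  simp only [PySem.Str.len_eq]
  rcases m.toList.length.eq_zero_or_pos with h0 | h0
  · simp only [h0, pvTags]; norm_num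
  rcases Nat.lt_or_ge m.toList.length 2 with h2 | h2
  · have h1 : m.toList.length = 1 := by omega
    simp only [h1, pvTags]; norm_num
  rcases Nat.lt_or_ge m.toList.length 3 with h3 | h3
  · have h2' : m.toList.length = 2 := by omega
    simp only [h2', pvTags]; norm_num
  · have hne1 : (m.toList.length : Int) ≠ 1 := by exact_mod_cast (by omega : m.toList.length ≠ 1)
    have hne2 : (m.toList.length : Int) ≠ 2 := by exact_mod_cast (by omega : m.toList.length ≠ 2)
    have hgt : (2 : Int) < (m.toList.length : Int) := by exact_mod_cast (by omega : 2 < m.toList.length)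
    simp only [hne1, hne2, hgt, if_false, if_pos]
    rw [PySem.List.foldl_append_singleton_eq_map (f := fun _ => "M")]
    have hlen : (PySem.List.pyRange 1 ((m.toList.length : Int) - 1) 1).length = m.toList.length - 2 := by
      rw [PySem.List.length_pyRange_one]; omega
    rw [List.map_const', hlen, pvTags_large (by omega)]
    simp

theorem pvEnumMap (cs : List Char) :
    (PySem.List.enumerate cs 0).map
      (fun ic => if (cs.length : Int) = 1 then "S" else if ic.1 = 0 then "B"
                 else if ic.1 = (cs.length : Int) - 1 then "E" else "M")
      = pvTags cs.length := by
  rw [PySem.List.enumerate_eq_map_pyRange (d := ' '), List.map_map, PySem.List.len_eq]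
  rcases cs.length.eq_zero_or_pos with h0 | h0
  · simp [h0, pvTags]
  rcases Nat.lt_or_ge cs.length 2 with h2 | h2
  · have h1 : cs.length = 1 := by omega
    rw [h1, show ((1 : Nat) : Int) = 0 + 1 by norm_num, PySem.List.pyRange_one_singleton]
    simp [pvTags]
  · -- cs.length ≥ 2 : split the index range as 0 :: middle ++ [length-1]
    have hne1 : (cs.length : Int) ≠ 1 := by exact_mod_cast (by omega : cs.length ≠ 1)
    have hlast0 : ((cs.length : Int) - 1) ≠ 0 := by omega
    rw [PySem.List.pyRange_one_cons (by exact_mod_cast h0)]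
    have hsplit : PySem.List.pyRange (0 + 1) ((cs.length : Int)) 1
        = PySem.List.pyRange 1 ((cs.length : Int) - 1) 1 ++ [(cs.length : Int) - 1] := by
      rw [show (cs.length : Int) = ((cs.length : Int) - 1) + 1 by ring,
        PySem.List.pyRange_one_succ_right (by omega)]
      norm_num
    rw [hsplit]
    simp only [List.map_cons, List.map_append, List.map_nil, Function.comp_apply]
    have hmid : (PySem.List.pyRange 1 ((cs.length : Int) - 1) 1).map
        ((fun ic : Int × Char => if (cs.length : Int) = 1 then "S" else if ic.1 = 0 then "B"
                  else if ic.1 = (cs.length : Int) - 1 then "E" else "M")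
          ∘ fun j => (j, PySem.List.pyGetD cs j ' '))
        = List.replicate (cs.length - 2) "M" := by
      have hc : ∀ j ∈ PySem.List.pyRange 1 ((cs.length : Int) - 1) 1,
          ((fun ic : Int × Char => if (cs.length : Int) = 1 then "S" else if ic.1 = 0 then "B"
            else if ic.1 = (cs.length : Int) - 1 then "E" else "M")
            ∘ fun j => (j, PySem.List.pyGetD cs j ' ')) j = "M" := by
        intro j hj
        rw [PySem.List.mem_pyRange_one] at hj
        simp only [Function.comp_apply]
        rw [if_neg hne1, if_neg (by omega : ¬ j = 0),
          if_neg (by omega : ¬ j = (cs.length : Int) - 1)]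
      rw [List.map_congr_left hc, List.map_const', PySem.List.length_pyRange_one]
      congr 1; omega
    rw [hmid, pvTags_large (by omega : 1 < cs.length)]
    simp [hne1, hlast0]

theorem pvStepB (acc : List String) (m : String) :
    (PySem.List.enumerate m.toList 0).foldl
      (fun l ic =>
        l ++ [if PySem.Str.len m = 1 then "S" else if ic.1 = 0 then "B"
              else if ic.1 = PySem.Str.len m - 1 then "E" else "M"]) acc
      = acc ++ pvTags m.toList.length := by
  rw [PySem.List.foldl_append_singleton_eq_map]
  simp only [PySem.Str.len_eq]
  congr 1
  exact pvEnumMap m.toList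

-- ===== VERDICT (by name: the statement is the Claim_ definition above) =====
theorem add_tag_to_morph_spec : Claim_equal_add_tag_to_morph := by
  intro morphemes _
  show add_tag_to_morph morphemes = add_tag_to_morph_alt morphemes
  unfold add_tag_to_morph add_tag_to_morph_alt
  congr 1
  apply List.foldl_ext
  intro acc m _
  exact (pvStepA acc m).trans (pvStepB acc m).symm
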